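-- pv_equiv track=rewrite | github.com/tarunganesh2004/Leetcode | LC Mothly/2025/January/1st_jan.py | maxScoreBrute
-- ===== SOURCE A (Python) =====
-- def maxScoreBrute(s):
--     ans=0
--     for i in range(len(s)-1):
--         cur=0
--         for j in range(i+1):
--             if s[j]=='0':
--                 cur+=1
--         for j in range(i+1,len(s)):
--             if s[j]=='1':
--                 cur+=1
--         ans=max(ans,cur)
--     return ans
-- ===== SOURCE B (Python) =====
-- def maxScoreBrute(s):
--     ones = sum(1 for ch in s if ch == '1')
--     zeros = 0
--     best = 0
--     for ch in s[:-1]: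
--         if ch == '0':
--             zeros += 1
--         elif ch == '1':
--             ones -= 1
--         best = max(best, zeros + ones)
--     return best
-- ===== Notes on version B (the rewrite author's own statement) =====
-- stated objective: faster
-- what changed: replaces the quadratic re-scan of both halves at every split point with a single pass that maintains running zero/one counts (ones seeded once) and a running maximum
import Mathlib
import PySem

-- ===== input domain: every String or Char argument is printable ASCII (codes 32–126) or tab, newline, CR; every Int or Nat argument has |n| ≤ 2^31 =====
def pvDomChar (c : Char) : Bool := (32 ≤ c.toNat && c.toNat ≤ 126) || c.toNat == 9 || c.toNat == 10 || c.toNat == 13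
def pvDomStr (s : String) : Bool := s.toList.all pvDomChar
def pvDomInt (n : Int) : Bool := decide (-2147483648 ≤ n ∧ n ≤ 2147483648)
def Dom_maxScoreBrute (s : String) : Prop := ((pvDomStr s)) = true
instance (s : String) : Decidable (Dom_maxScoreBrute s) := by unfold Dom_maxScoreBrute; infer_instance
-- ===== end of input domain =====

-- ===== PORT A =====
-- B replaces A's O(n^2) split re-scans with one O(n) pass keeping running zero/one counts.
def maxScoreBrute (s : String) : Int :=
  (PySem.List.pyRange 0 (PySem.Str.len s - 1) 1).foldl (fun ans i =>
    let cur : Int := (PySem.List.pyRange 0 (i + 1) 1).foldl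
      (fun c j => if PySem.Str.pyGet? s j = some '0' then c + 1 else c) 0
    let cur : Int := (PySem.List.pyRange (i + 1) (PySem.Str.len s) 1).foldl
      (fun c j => if PySem.Str.pyGet? s j = some '1' then c + 1 else c) cur
    max ans cur) 0

-- ===== PORT B =====
def maxScoreBrute_alt (s : String) : Int :=
  let ones : Int := s.toList.foldl (fun a ch => if ch = '1' then a + 1 else a) 0
  let st := (PySem.Str.slice s none (some (-1))).toList.foldl
    (fun (st : Int × Int × Int) ch =>
      let p := if ch = '0' then (st.1, st.2.1 + 1)
               else if ch = '1' then (st.1 - 1, st.2.1)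
               else (st.1, st.2.1)
      (p.1, p.2, max st.2.2 (p.2 + p.1))) (ones, 0, 0)
  st.2.2

-- ===== PRECONDITION & SPEC =====
def Spec_maxScoreBrute (s : String) (out : Int) : Prop := out = maxScoreBrute_alt s
instance (s : String) (out : Int) : Decidable (Spec_maxScoreBrute s out) := by unfold Spec_maxScoreBrute; infer_instance

-- ===== CLAIM (what is proved, stated in full; the proofs are below) =====
def Claim_equal_maxScoreBrute : Prop := ∀ (s : String), Dom_maxScoreBrute s → Spec_maxScoreBrute s (maxScoreBrute s)

-- ===== LEMMAS AND PROOFS =====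
-- L1: A's prefix scan counts v in take m

lemma foldl_range_cnt (l : List Char) (v : Char) (m : Nat) (hm : m ≤ l.length) (init : Int) :
    (PySem.List.pyRange 0 (m:Int) 1).foldl
      (fun c j => if PySem.List.pyGet? l j = some v then c + 1 else c) init
    = init + ((l.take m).count v : Int) := by
  induction m generalizing init with
  | zero => simp
  | succ m ih =>
    have h1 : ((m:Int) + 1) = (((m+1 : Nat)):Int) := by push_cast; ring
    have h2 : PySem.List.pyRange 0 ((m+1:Nat):Int) 1
        = PySem.List.pyRange 0 (m:Int) 1 ++ [(m:Int)] := by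
      rw [← h1, PySem.List.pyRange_one_succ_right (by positivity)]
    rw [h2, List.foldl_append, ih (by omega)]
    have hg : PySem.List.pyGet? l (m:Int) = some l[m] :=
      PySem.List.pyGet?_ofNat l m (by omega)
    have htake : l.take (m+1) = l.take m ++ [l[m]] := by
      rw [List.take_add_one]
      simp [List.getElem?_eq_getElem (by omega : m < l.length)]
    simp only [List.foldl_cons, List.foldl_nil, hg, htake, List.count_append]
    by_cases hv : l[m] = v <;> simp [hv, add_assoc]

-- L2: suffix fold
lemma foldl_range_cnt_from (l : List Char) (v : Char) (a : Nat) (_ha : a ≤ l.length) (init : Int) :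
    (PySem.List.pyRange (a:Int) ((l.length:Int)) 1).foldl
      (fun c j => if PySem.List.pyGet? l j = some v then c + 1 else c) init
    = init + ((l.drop a).count v : Int) := by
  have hcg : (PySem.List.pyRange (a:Int) ((l.length:Int)) 1).foldl
      (fun c j => if PySem.List.pyGet? l j = some v then c + 1 else c) init
    = (PySem.List.pyRange (a:Int) ((l.length:Int)) 1).foldl
      (fun c j => if PySem.List.pyGetD l j v = v then c + 1 else c) init := by
    apply PySem.List.foldl_congr_mem
    intro acc j hj
    rw [PySem.List.mem_pyRange_one] at hj
    have h1 : PySem.List.pyGet? l j = l[j.toNat]? := PySem.List.pyGet?_of_nonneg l (by omega)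
    have h2 : PySem.List.pyGetD l j v = l[j.toNat]'(by omega) :=
      PySem.List.pyGetD_eq_getElem l v (by omega) (by omega)
    rw [h1, h2]
    simp [List.getElem?_eq_getElem (show j.toNat < l.length by omega)]
  rw [hcg]
  rw [show ((l.length:Int)) = PySem.List.len l from rfl]
  rw [PySem.List.foldl_pyRange_pyGetD (xs := l) (d := v) (a := (a:Int)) (init := init)
    (f := fun (c : Int) ch => if ch = v then c + 1 else c) (ha := by positivity)]
  rw [PySem.List.foldl_ite_add_one (p := fun ch => ch = v)]
  congr 1


-- B's one-pass loop characterised as a running max over prefixes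
lemma bloop (c : List Char) (o z b : Int) :
    (c.foldl (fun (st : Int × Int × Int) ch =>
      let p := if ch = '0' then (st.1, st.2.1 + 1)
               else if ch = '1' then (st.1 - 1, st.2.1)
               else (st.1, st.2.1)
      (p.1, p.2, max st.2.2 (p.2 + p.1))) (o, z, b)).2.2
    = (List.range c.length).foldl
        (fun ans k => max ans (z + ((c.take (k+1)).count '0' : Int)
          + (o - ((c.take (k+1)).count '1' : Int)))) b := by
  induction c generalizing o z b with
  | nil => simp
  | cons ch cs ih =>
    simp only [List.foldl_cons, List.length_cons, List.range_succ_eq_map, List.foldl_map]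
    by_cases h0 : ch = '0'
    · subst h0
      simp only [reduceIte, Char.reduceEq, if_false]
      rw [ih]
      congr 1
      · funext ans k
        simp
        ring
      · simp
    · by_cases h1 : ch = '1'
      · subst h1
        simp only [reduceIte, Char.reduceEq, if_false]
        rw [ih]
        congr 1
        · funext ans k
          simp
          ring
        · simp
      · simp only [h0, h1, if_false]
        rw [ih]
        congr 1
        · funext ans k
          simp [h0, h1]
        · simp [h0, h1]

theorem cnt_ones (l : List Char) :
    List.foldl (fun a ch => if ch = '1' then a + 1 else a) 0 l = (l.count '1' : Int) := by
  rw [PySem.List.foldl_ite_add_one (p := fun ch => ch = '1')]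
  rw [List.count_eq_countP]
  simp only [zero_add, Nat.cast_inj]
  apply List.countP_congr
  intro x _
  simp

theorem main_list (l : List Char) :
    List.foldl
      (fun ans i =>
        max ans
          (List.foldl (fun c j => if PySem.Chars.pyGet? l j = some '1' then c + 1 else c)
            (List.foldl (fun c j => if PySem.Chars.pyGet? l j = some '0' then c + 1 else c) 0
              (PySem.List.pyRange 0 (i + 1) 1))
            (PySem.List.pyRange (i + 1) (l.length : Int) 1)))
      0 (PySem.List.pyRange 0 ((l.length : Int) - 1) 1) =
    (List.foldl
      (fun (st : Int × Int × Int) ch =>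
        let p := if ch = '0' then (st.1, st.2.1 + 1)
                 else if ch = '1' then (st.1 - 1, st.2.1)
                 else (st.1, st.2.1)
        (p.1, p.2, max st.2.2 (p.2 + p.1)))
      (List.foldl (fun a ch => if ch = '1' then a + 1 else a) 0 l, 0, 0) l.dropLast).2.2 := by
  rw [cnt_ones, bloop]
  rw [PySem.List.pyRange_one 0 ((l.length : Int) - 1), List.foldl_map]
  have hm : ((l.length : Int) - 1 - 0).toNat = l.length - 1 := by omega
  rw [hm]
  rw [List.length_dropLast]
  refine Eq.trans (PySem.List.foldl_congr_mem (l := List.range (l.length - 1)) (init := (0:Int))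
      (g := fun (ans : Int) (k : Nat) => max ans (((l.take (k+1)).count '0' : Int)
        + ((l.count '1' : Int) - ((l.take (k+1)).count '1' : Int)))) (h := ?_)) ?_
  · intro ans k hk
    rw [List.mem_range] at hk
    have hb : ((0 : Int) + (k : Nat) + 1) = ((k + 1 : Nat) : Int) := by push_cast; ring
    rw [hb]
    rw [show (PySem.Chars.pyGet? l) = (PySem.List.pyGet? l) from rfl]
    rw [foldl_range_cnt l '0' (k+1) (by omega) 0]
    rw [foldl_range_cnt_from l '1' (k+1) (by omega)]
    have hsplit : (l.count '1' : Int)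
        = ((l.take (k+1)).count '1' : Int) + ((l.drop (k+1)).count '1' : Int) := by
      conv_lhs => rw [← List.take_append_drop (k+1) l]
      push_cast [List.count_append]
      ring
    rw [hsplit]
    push_cast
    ring_nf
  · apply PySem.List.foldl_congr_mem
    intro acc k hk
    rw [List.mem_range] at hk
    have htake : l.dropLast.take (k+1) = l.take (k+1) := by
      rw [List.dropLast_eq_take, List.take_take]
      congr 1
      omega
    rw [htake]
    ring_nf

-- ===== VERDICT (by name: the statement is the Claim_ definition above) =====
theorem maxScoreBrute_spec : Claim_equal_maxScoreBrute := by
  intro s _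
  unfold Spec_maxScoreBrute maxScoreBrute maxScoreBrute_alt
  simp only [PySem.Str.len_eq, PySem.Str.pyGet?_eq, PySem.Str.slice_to_neg_one]
  exact main_list s.toList
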